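-- pv_equiv track=rewrite | github.com/cake2000/CreatiCodeSkillMap | skillsv4/apply_g7_fixes.py | find_dependencies_section
-- ===== SOURCE A (Python) =====
-- from typing import Dict, List, Tuple
--
-- def find_dependencies_section(skill_block: str) -> Tuple[int, int]:
--     """
--     Find the Dependencies section within a skill block.
--     Returns (start_offset, end_offset) relative to skill_block start.
--     """
--     lines = skill_block.split('\n')
--     dep_start = -1
--     dep_end = -1
--
--     for i, line in enumerate(lines):
--         if line.strip() == 'Dependencies:':
--             dep_start = i
--             # Find end of dependencies (next non-empty line that doesn't start with * or empty line followed by non-dependency)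
--             for j in range(i + 1, len(lines)):
--                 stripped = lines[j].strip()
--                 # End when we hit an empty line or a line that doesn't start with *
--                 if stripped and not stripped.startswith('*'):
--                     dep_end = j
--                     break
--             if dep_end == -1:
--                 dep_end = len(lines)
--             break
--
--     if dep_start == -1:
--         return (-1, -1)
--
--     # Calculate character offsets
--     start_offset = sum(len(line) + 1 for line in lines[:dep_start])
--     end_offset = sum(len(line) + 1 for line in lines[:dep_end])
--
--     return (start_offset, end_offset)
-- ===== SOURCE B (Python) =====
-- def find_dependencies_section(skill_block):
--     """Single pass over the lines with a running character offset (no index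
--     arithmetic, no prefix-sum passes)."""
--     it = iter(skill_block.split('\n'))
--     pos = 0
--     for line in it:
--         if line.strip() == 'Dependencies:':
--             start = pos
--             pos += len(line) + 1
--             for line2 in it:
--                 s = line2.strip()
--                 if s and not s.startswith('*'):
--                     break
--                 pos += len(line2) + 1
--             return (start, pos)
--         pos += len(line) + 1
--     return (-1, -1)
-- ===== Notes on version B (the rewrite author's own statement) =====
-- stated objective: simpler
-- what changed: Replaces A's index-based search (enumerate + range(i+1,len) inner index scan + two separate sum()-over-prefix passes to convert line indices into character offsets) by one index-free traversal of a shared line iterator that carries a running character offset, so offsets are ready the moment the boundaries are found.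
import Mathlib
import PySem

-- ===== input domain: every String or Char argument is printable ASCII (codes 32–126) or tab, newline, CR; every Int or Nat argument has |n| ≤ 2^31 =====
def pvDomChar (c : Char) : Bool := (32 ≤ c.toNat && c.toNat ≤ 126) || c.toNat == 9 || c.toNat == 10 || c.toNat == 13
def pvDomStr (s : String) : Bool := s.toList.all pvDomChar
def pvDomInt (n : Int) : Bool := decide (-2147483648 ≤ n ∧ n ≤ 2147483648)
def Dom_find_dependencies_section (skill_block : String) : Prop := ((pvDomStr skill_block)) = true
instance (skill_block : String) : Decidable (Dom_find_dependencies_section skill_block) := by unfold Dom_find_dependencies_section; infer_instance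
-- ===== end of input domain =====

-- B: one index-free pass with a running character offset instead of A's index scans plus two prefix-sum passes (objective: simpler).

-- skill_block.split('\n'): sep is the non-empty literal '\n', so Str.split? is always some; getD never fires
def fdsSplit (s : String) : List String := (PySem.Str.split? s "\n").getD []

-- ===== PORT A =====
-- sum(len(line) + 1 for line in ls)
def fdsSum (ls : List String) : Int :=
  ls.foldl (fun a s => a + (PySem.Str.len s + 1)) 0

-- the inner 'for j in range(i+1, len(lines))' loop: returns dep_end found by break, or -1
def fdsInner (lines : List String) : List Int → Int
  | [] => -1
  | j :: rest =>
    let stripped := PySem.Str.strip (PySem.List.pyGetD lines j "")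
    if stripped != "" && !(PySem.Str.startswith stripped "*") then j
    else fdsInner lines rest

-- the outer 'for i, line in enumerate(lines)' loop: returns (dep_start, dep_end)
def fdsOuter (lines : List String) (i : Int) : List String → Int × Int
  | [] => (-1, -1)
  | line :: rest =>
    if PySem.Str.strip line == "Dependencies:" then
      let e := fdsInner lines (PySem.List.pyRange (i + 1) ((lines.length : Int)) 1)
      (i, if e == -1 then ((lines.length : Int)) else e)
    else fdsOuter lines (i + 1) rest

def find_dependencies_section (skill_block : String) : Int × Int :=
  let lines := fdsSplit skill_block
  let p := fdsOuter lines 0 lines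
  if p.1 == -1 then (-1, -1)
  else (fdsSum (PySem.List.slice lines none (some p.1)),
        fdsSum (PySem.List.slice lines none (some p.2)))

-- ===== PORT B =====
-- the inner 'for line2 in it' loop: advances the running offset until the terminator
def fdsScan2 (pos : Int) : List String → Int
  | [] => pos
  | line :: rest =>
    let s := PySem.Str.strip line
    if s != "" && !(PySem.Str.startswith s "*") then pos
    else fdsScan2 (pos + (PySem.Str.len line + 1)) rest

-- the outer 'for line in it' loop with the running offset pos
def fdsScan1 (pos : Int) : List String → Int × Int
  | [] => (-1, -1)
  | line :: rest =>
    if PySem.Str.strip line == "Dependencies:" then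
      (pos, fdsScan2 (pos + (PySem.Str.len line + 1)) rest)
    else fdsScan1 (pos + (PySem.Str.len line + 1)) rest

def find_dependencies_section_alt (skill_block : String) : Int × Int :=
  fdsScan1 0 (fdsSplit skill_block)

-- ===== PRECONDITION & SPEC =====
def Spec_find_dependencies_section (skill_block : String) (out : Int × Int) : Prop := out = find_dependencies_section_alt skill_block
instance (skill_block : String) (out : Int × Int) : Decidable (Spec_find_dependencies_section skill_block out) := by unfold Spec_find_dependencies_section; infer_instance

-- ===== CLAIM (what is proved, stated in full; the proofs are below) =====
def Claim_equal_find_dependencies_section : Prop := ∀ (skill_block : String), Dom_find_dependencies_section skill_block → Spec_find_dependencies_section skill_block (find_dependencies_section skill_block)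

-- ===== LEMMAS AND PROOFS =====

theorem fdsSum_foldl (l : List String) (init : Int) :
    l.foldl (fun a s => a + (PySem.Str.len s + 1)) init = init + fdsSum l := by
  induction l generalizing init with
  | nil => simp [fdsSum]
  | cons x xs ih =>
    simp only [fdsSum, List.foldl_cons]
    rw [ih, ih]
    ring

theorem fdsSum_append_singleton (pre : List String) (x : String) :
    fdsSum (pre ++ [x]) = fdsSum pre + (PySem.Str.len x + 1) := by
  unfold fdsSum
  rw [List.foldl_append, fdsSum_foldl]
  simp [List.foldl, fdsSum]

theorem fds_inner_eq (suf pre : List String) :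
    fdsScan2 (fdsSum pre) suf =
      fdsSum (PySem.List.slice (pre ++ suf) none (some
        (if fdsInner (pre ++ suf)
              (PySem.List.pyRange ((pre.length : Int)) (((pre ++ suf).length : Int)) 1) == -1
         then (((pre ++ suf).length : Int))
         else fdsInner (pre ++ suf)
              (PySem.List.pyRange ((pre.length : Int)) (((pre ++ suf).length : Int)) 1)))) := by
  induction suf generalizing pre with
  | nil =>
    rw [PySem.List.pyRange_one_eq_nil (by simp)]
    simp [fdsInner, fdsScan2, PySem.List.slice_to_natCast]
  | cons line rest ih =>
    have hlt : (pre.length : Int) < ((pre ++ line :: rest).length : Int) := by simp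
    rw [PySem.List.pyRange_one_cons hlt]
    have hget : PySem.List.pyGetD (pre ++ line :: rest) ((pre.length : Int)) "" = line := by
      rw [PySem.List.pyGetD_natCast]
      simp [List.getD]
    simp only [fdsInner, hget]
    have hne : ((pre.length : Int) == -1) = false := beq_eq_false_iff_ne.mpr (by omega)
    by_cases hc : (PySem.Str.strip line != "" && !(PySem.Str.startswith (PySem.Str.strip line) "*")) = true
    · -- terminator: both stop here
      simp only [hc, if_true, hne, Bool.false_eq_true, if_false]
      rw [PySem.List.slice_to_natCast]
      have htake : (pre ++ line :: rest).take pre.length = pre := by simp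
      rw [htake]
      simp only [fdsScan2, hc, if_true]
    · -- not a terminator: advance by len line + 1
      rw [Bool.not_eq_true] at hc
      simp only [hc, Bool.false_eq_true, if_false]
      have hLHS : fdsScan2 (fdsSum pre) (line :: rest)
          = fdsScan2 (fdsSum (pre ++ [line])) rest := by
        simp only [fdsScan2, hc, Bool.false_eq_true, if_false, fdsSum_append_singleton]
      rw [hLHS]
      have hIH := ih (pre ++ [line])
      have hcast : (((pre ++ [line]).length : Int)) = (pre.length : Int) + 1 := by simp
      have hassoc : (pre ++ [line]) ++ rest = pre ++ line :: rest := by simp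
      rw [hcast, hassoc] at hIH
      exact hIH

theorem fds_outer_eq (suf pre : List String) :
    fdsScan1 (fdsSum pre) suf =
      (let p := fdsOuter (pre ++ suf) ((pre.length : Int)) suf
       if p.1 == -1 then (-1, -1)
       else (fdsSum (PySem.List.slice (pre ++ suf) none (some p.1)),
             fdsSum (PySem.List.slice (pre ++ suf) none (some p.2)))) := by
  induction suf generalizing pre with
  | nil => simp [fdsScan1, fdsOuter]
  | cons line rest ih =>
    have hne : ((pre.length : Int) == -1) = false := beq_eq_false_iff_ne.mpr (by omega)
    have hcast : (((pre ++ [line]).length : Int)) = (pre.length : Int) + 1 := by simp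
    have hassoc : (pre ++ [line]) ++ rest = pre ++ line :: rest := by simp
    by_cases hm : (PySem.Str.strip line == "Dependencies:") = true
    · simp only [fdsScan1, fdsOuter, hm, if_true, hne, Bool.false_eq_true, if_false]
      have h1 : fdsSum (PySem.List.slice (pre ++ line :: rest) none (some ((pre.length : Int)))) = fdsSum pre := by
        rw [PySem.List.slice_to_natCast]
        have : (pre ++ line :: rest).take pre.length = pre := by simp
        rw [this]
      have h2 := fds_inner_eq rest (pre ++ [line])
      rw [hcast, hassoc, fdsSum_append_singleton] at h2
      rw [h1, h2]
    · rw [Bool.not_eq_true] at hm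
      simp only [fdsScan1, fdsOuter, hm, Bool.false_eq_true, if_false,
                 ← fdsSum_append_singleton]
      have hIH := ih (pre ++ [line])
      rw [hcast, hassoc] at hIH
      exact hIH

-- ===== VERDICT (by name: the statement is the Claim_ definition above) =====
theorem find_dependencies_section_spec : Claim_equal_find_dependencies_section := by
  intro s _
  unfold Spec_find_dependencies_section find_dependencies_section find_dependencies_section_alt
  have h := fds_outer_eq (fdsSplit s) []
  simp only [List.nil_append, List.length_nil, Int.natCast_zero] at h
  rw [show fdsSum [] = 0 from rfl] at h
  exact h.symm
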